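-- pv_equiv track=rewrite | github.com/sherrillmix/ampCountPy | ampcountpy/ampcount.py | pairSortedForwardReverse
-- ===== SOURCE A (Python) =====
-- def isSorted(x):
--     return all([x[ii]<=x[ii+1] for ii in range(len(x)-1)])
--
-- def pairSortedForwardReverse(forwards,reverses,maxLength=None,returnPos=True):
--     if maxLength is None: maxLength=30000
--     if not isinstance(maxLength,list): maxLength=[maxLength]*len(forwards)
--     if len(maxLength) != len(forwards): raise(ValueError("forwards and maxLength different lengths"))
--     #if not sorted then we need to sort but that will lose correspondence with information outside the function or add unneccesary code so just throw error for now
--     if not isSorted(forwards): raise(ValueError("Unsorted forwards"))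
--     if not isSorted(reverses): raise(ValueError("Unsorted reverses"))
--     reverseIdStart=0
--     nReverse=len(reverses)
--     out=[]
--     for forwardId in range(len(forwards)):
--         out.append([])
--         while reverseIdStart<nReverse and reverses[reverseIdStart]<forwards[forwardId]:
--             reverseIdStart+=1
--         reverseId=reverseIdStart
--         while reverseId<nReverse and reverses[reverseId]<forwards[forwardId]+maxLength[forwardId] and reverses[reverseId]>=forwards[forwardId]:
--             if returnPos: out[forwardId].append(reverses[reverseId])
--             else: out[forwardId].append(reverseId)
--             reverseId+=1
--     return out
-- ===== SOURCE B (Python) =====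
-- def _bisectLeft(a, x):
--     lo, hi = 0, len(a)
--     while lo < hi:
--         mid = (lo + hi) // 2
--         if a[mid] < x:
--             lo = mid + 1
--         else:
--             hi = mid
--     return lo
--
--
-- def pairSortedForwardReverse(forwards, reverses, maxLength=None, returnPos=True):
--     if maxLength is None:
--         maxLength = 30000
--     if not isinstance(maxLength, list):
--         maxLength = [maxLength] * len(forwards)
--     if len(maxLength) != len(forwards):
--         raise ValueError("forwards and maxLength different lengths")
--     if any(a > b for a, b in zip(forwards, forwards[1:])):
--         raise ValueError("Unsorted forwards")
--     if any(a > b for a, b in zip(reverses, reverses[1:])):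
--         raise ValueError("Unsorted reverses")
--     out = []
--     for f, m in zip(forwards, maxLength):
--         lo = _bisectLeft(reverses, f)
--         hi = _bisectLeft(reverses, f + m)
--         out.append(reverses[lo:hi] if returnPos else list(range(lo, hi)))
--     return out
-- ===== Notes on version B (the rewrite author's own statement) =====
-- stated objective: alternative
-- what changed: Replaced the stateful sliding two-pointer scan (shared reverseIdStart advanced across forwards, then an inner linear collect loop) by an independent per-forward binary search: lo = bisect_left(reverses, f), hi = bisect_left(reverses, f+m), emitting the slice reverses[lo:hi] (or range(lo,hi) of indices).
import Mathlib
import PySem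

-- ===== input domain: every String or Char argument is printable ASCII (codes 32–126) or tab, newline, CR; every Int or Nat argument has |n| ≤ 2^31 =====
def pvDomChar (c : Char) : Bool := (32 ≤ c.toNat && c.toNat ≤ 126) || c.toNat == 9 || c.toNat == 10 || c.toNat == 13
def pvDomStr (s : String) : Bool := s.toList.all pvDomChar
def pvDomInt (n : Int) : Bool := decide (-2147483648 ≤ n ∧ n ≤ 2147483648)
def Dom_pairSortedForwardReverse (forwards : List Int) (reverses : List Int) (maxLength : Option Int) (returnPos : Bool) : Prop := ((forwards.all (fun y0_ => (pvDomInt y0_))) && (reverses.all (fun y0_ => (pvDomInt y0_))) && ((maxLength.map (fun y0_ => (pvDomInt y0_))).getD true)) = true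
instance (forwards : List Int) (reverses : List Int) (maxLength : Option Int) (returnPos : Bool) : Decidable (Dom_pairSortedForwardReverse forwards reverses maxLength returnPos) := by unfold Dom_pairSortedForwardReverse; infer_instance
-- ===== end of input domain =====

-- B replaces A's stateful sliding two-pointer scan by an independent per-forward binary
-- search (bisect_left for each window bound, then a slice / index range) — alternative
-- algorithm, proved to return the same value on sorted inputs (unsorted input raises in
-- both Pythons and is outside Pre_).

-- ===== PORT A =====
-- isSorted: all([x[ii]<=x[ii+1] for ii in range(len(x)-1)]); indices always in range,
-- so pyGetD's default is never used.
def isSortedA (x : List Int) : Bool :=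
  ((PySem.List.pyRange 0 ((x.length : Int) - 1) 1).map
    (fun ii => decide (PySem.List.pyGetD x ii 0 ≤ PySem.List.pyGetD x (ii + 1) 0))).all id

-- while reverseIdStart<nReverse and reverses[reverseIdStart]<forwards[forwardId]
-- fuel-structural recursion (fuel ≥ steps remaining, so the guard never bites)
def advA (k : Nat) (reverses : List Int) (f : Int) (idx : Nat) : Nat :=
  match k with
  | 0 => idx
  | k + 1 =>
    if idx < reverses.length then
      if PySem.List.pyGetD reverses (idx : Int) 0 < f then advA k reverses f (idx + 1) else idx
    else idx

-- while reverseId<nReverse and reverses[reverseId]<f+maxLength[fid] and reverses[reverseId]>=f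
def collA (k : Nat) (reverses : List Int) (f lim : Int) (returnPos : Bool) (idx : Nat) : List Int :=
  match k with
  | 0 => []
  | k + 1 =>
    if idx < reverses.length then
      if PySem.List.pyGetD reverses (idx : Int) 0 < lim ∧ f ≤ PySem.List.pyGetD reverses (idx : Int) 0 then
        (if returnPos then PySem.List.pyGetD reverses (idx : Int) 0 else (idx : Int))
          :: collA k reverses f lim returnPos (idx + 1)
      else []
    else []

-- the 'for forwardId in range(len(forwards))' loop carrying reverseIdStart and out
def loopA (reverses : List Int) (returnPos : Bool) :
    List (Int × Int) → Nat → List (List Int) → List (List Int)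
  | [], _, out => out
  | (f, m) :: rest, start, out =>
    loopA reverses returnPos rest (advA (reverses.length + 1) reverses f start)
      (out ++ [collA (reverses.length + 1) reverses f (f + m) returnPos
        (advA (reverses.length + 1) reverses f start)])

def pairSortedForwardReverse (forwards : List Int) (reverses : List Int) (maxLength : Option Int) (returnPos : Bool) : List (List Int) :=
  let m := maxLength.getD 30000          -- if maxLength is None: maxLength=30000
  let ml := List.replicate forwards.length m   -- maxLength=[maxLength]*len(forwards)
  if ml.length ≠ forwards.length then []       -- ValueError (branch never taken)
  else if ¬ isSortedA forwards then []         -- ValueError "Unsorted forwards" (outside Pre_)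
  else if ¬ isSortedA reverses then []         -- ValueError "Unsorted reverses" (outside Pre_)
  else loopA reverses returnPos (forwards.zip ml) 0 []

-- ===== PORT B =====
-- hand-written bisect_left of Source B; (lo+hi)//2 on nonnegative ints is Nat division
-- fuel-structural recursion; fuel a.length + 1 bounds the iteration count
def bisB (k : Nat) (a : List Int) (x : Int) (lo hi : Nat) : Nat :=
  match k with
  | 0 => lo
  | k + 1 =>
    if lo < hi then
      if PySem.List.pyGetD a (((lo + hi) / 2 : Nat) : Int) 0 < x then
        bisB k a x ((lo + hi) / 2 + 1) hi
      else bisB k a x lo ((lo + hi) / 2)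
    else lo

-- any(a > b for a, b in zip(l, l[1:])) negated
def isSortedB (l : List Int) : Bool :=
  (l.zip (PySem.List.slice l (some 1) none)).all (fun p => decide (p.1 ≤ p.2))

def pairSortedForwardReverse_alt (forwards : List Int) (reverses : List Int) (maxLength : Option Int) (returnPos : Bool) : List (List Int) :=
  let m := maxLength.getD 30000
  if isSortedB forwards && isSortedB reverses then
    -- zip(forwards, [m]*len(forwards)) pairs each f with the same m
    forwards.map (fun f =>
      if returnPos then
        PySem.List.slice reverses (some ((bisB (reverses.length + 1) reverses f 0 reverses.length : Nat) : Int))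
          (some ((bisB (reverses.length + 1) reverses (f + m) 0 reverses.length : Nat) : Int))
      else
        PySem.List.pyRange ((bisB (reverses.length + 1) reverses f 0 reverses.length : Nat) : Int)
          ((bisB (reverses.length + 1) reverses (f + m) 0 reverses.length : Nat) : Int) 1)
  else []                                       -- ValueError raised in Python (outside Pre_)

-- ===== PRECONDITION & SPEC =====
-- Pre_ excludes exactly the inputs on which A raises ValueError: unsorted forwards or reverses.
def Pre_pairSortedForwardReverse (forwards : List Int) (reverses : List Int) (maxLength : Option Int) (returnPos : Bool) : Prop :=
  List.IsChain (· ≤ ·) forwards ∧ List.IsChain (· ≤ ·) reverses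
instance (forwards : List Int) (reverses : List Int) (maxLength : Option Int) (returnPos : Bool) : Decidable (Pre_pairSortedForwardReverse forwards reverses maxLength returnPos) := by unfold Pre_pairSortedForwardReverse; infer_instance
def pvWitness_pairSortedForwardReverse : List Int × List Int × Option Int × Bool := ([1, 5], [2, 3, 100], some 10, true)

def Spec_pairSortedForwardReverse (forwards : List Int) (reverses : List Int) (maxLength : Option Int) (returnPos : Bool) (out : List (List Int)) : Prop := out = pairSortedForwardReverse_alt forwards reverses maxLength returnPos
instance (forwards : List Int) (reverses : List Int) (maxLength : Option Int) (returnPos : Bool) (out : List (List Int)) : Decidable (Spec_pairSortedForwardReverse forwards reverses maxLength returnPos out) := by unfold Spec_pairSortedForwardReverse; infer_instance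

-- ===== CLAIM (what is proved, stated in full; the proofs are below) =====
def Claim_equal_pairSortedForwardReverse : Prop := ∀ (forwards : List Int) (reverses : List Int) (maxLength : Option Int) (returnPos : Bool), Dom_pairSortedForwardReverse forwards reverses maxLength returnPos → Pre_pairSortedForwardReverse forwards reverses maxLength returnPos → Spec_pairSortedForwardReverse forwards reverses maxLength returnPos (pairSortedForwardReverse forwards reverses maxLength returnPos)

-- ===== LEMMAS AND PROOFS =====

-- number of elements of a that are < x (as a takeWhile length); on a sorted list this is
-- both what bisect_left returns and where A's two-pointer scan stands
def lbN (a : List Int) (x : Int) : Nat := (a.takeWhile (fun r => decide (r < x))).length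

lemma lbN_cons (hd : Int) (t : List Int) (x : Int) :
    lbN (hd :: t) x = if hd < x then lbN t x + 1 else 0 := by
  by_cases hx : hd < x <;> simp [lbN, List.takeWhile_cons, hx]

lemma lb_le (a : List Int) (x : Int) : lbN a x ≤ a.length := by
  induction a with
  | nil => simp [lbN]
  | cons h t ih => rw [lbN_cons, List.length_cons]; split <;> omega

lemma lb_lt (a : List Int) (x : Int) : ∀ i (hi : i < a.length), i < lbN a x → a[i] < x := by
  induction a with
  | nil => intro i hi; simp at hi
  | cons h t ih =>
    intro i hi hlt
    rw [lbN_cons] at hlt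
    by_cases hx : h < x
    · rw [if_pos hx] at hlt
      cases i with
      | zero => simpa using hx
      | succ j => simpa using ih j (by simpa using hi) (by omega)
    · rw [if_neg hx] at hlt
      exact absurd hlt (by omega)

lemma lb_stop (a : List Int) (x : Int) :
    ∀ i (hi : i < a.length), lbN a x = i → ¬ a[i] < x := by
  induction a with
  | nil => intro i hi; simp at hi
  | cons hd t ih =>
    intro i hi heq
    rw [lbN_cons] at heq
    by_cases hx : hd < x
    · rw [if_pos hx] at heq
      cases i with
      | zero => exact absurd heq (by omega)
      | succ j => simpa using ih j (by simpa using hi) (by omega)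
    · rw [if_neg hx] at heq
      cases i with
      | zero => simpa using hx
      | succ j => exact absurd heq (by omega)

lemma lb_ge (a : List Int) (x : Int) (hs : a.Pairwise (· ≤ ·)) :
    ∀ i (hi : i < a.length), lbN a x ≤ i → x ≤ a[i] := by
  intro i hi hle
  have h1 : lbN a x < a.length := Nat.lt_of_le_of_lt hle hi
  have h2 : ¬ a[lbN a x]'h1 < x := lb_stop a x _ h1 rfl
  rcases Nat.eq_or_lt_of_le hle with heq | hlt
  · subst heq
    exact not_lt.mp h2
  · have h3 := (List.pairwise_iff_getElem.mp hs) _ _ h1 hi hlt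
    exact le_trans (not_lt.mp h2) h3

lemma lb_mono (a : List Int) (hs : a.Pairwise (· ≤ ·)) {x y : Int} (hxy : x ≤ y) :
    lbN a x ≤ lbN a y := by
  by_contra hlt
  push_neg at hlt
  have h1 : lbN a y < a.length := lt_of_lt_of_le hlt (lb_le a x)
  have h2 := lb_lt a x _ h1 hlt
  have h3 := lb_ge a y hs _ h1 le_rfl
  omega

lemma bis_eq_aux (a : List Int) (x : Int) (hs : a.Pairwise (· ≤ ·)) :
    ∀ k lo hi, hi - lo ≤ k → lo ≤ lbN a x → lbN a x ≤ hi → hi ≤ a.length →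
      bisB k a x lo hi = lbN a x := by
  intro k
  induction k with
  | zero =>
    intro lo hi h1 h2 h3 h4
    simp only [bisB]
    omega
  | succ n ih =>
    intro lo hi h1 h2 h3 h4
    simp only [bisB]
    by_cases hlh : lo < hi
    · rw [if_pos hlh]
      have hm2 : lo ≤ (lo + hi) / 2 := by omega
      have hm1 : (lo + hi) / 2 < hi := by omega
      have hmlen : (lo + hi) / 2 < a.length := by omega
      rw [PySem.List.pyGetD_natCast, List.getD_eq_getElem a 0 hmlen]
      by_cases hc : a[(lo + hi) / 2] < x
      · rw [if_pos hc]
        have hmid : (lo + hi) / 2 < lbN a x := by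
          by_contra hcon
          push_neg at hcon
          have := lb_ge a x hs _ hmlen hcon
          omega
        exact ih ((lo + hi) / 2 + 1) hi (by omega) (by omega) h3 h4
      · rw [if_neg hc]
        have hmid : lbN a x ≤ (lo + hi) / 2 := by
          by_contra hcon
          push_neg at hcon
          exact hc (lb_lt a x _ hmlen hcon)
        exact ih lo ((lo + hi) / 2) (by omega) h2 hmid (by omega)
    · rw [if_neg hlh]
      omega

lemma bis_eq (a : List Int) (x : Int) (hs : a.Pairwise (· ≤ ·)) :
    bisB (a.length + 1) a x 0 a.length = lbN a x :=
  bis_eq_aux a x hs (a.length + 1) 0 a.length (by omega) (Nat.zero_le _) (lb_le a x) le_rfl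

lemma adv_eq_aux (a : List Int) (f : Int) (hs : a.Pairwise (· ≤ ·)) :
    ∀ k start, a.length - start ≤ k → start ≤ lbN a f → advA k a f start = lbN a f := by
  intro k
  induction k with
  | zero =>
    intro start h1 h2
    simp only [advA]
    have := lb_le a f
    omega
  | succ n ih =>
    intro start h1 h2
    simp only [advA]
    by_cases hlt : start < a.length
    · rw [if_pos hlt, PySem.List.pyGetD_natCast, List.getD_eq_getElem a 0 hlt]
      by_cases hc : a[start] < f
      · rw [if_pos hc]
        have hst : start < lbN a f := by
          by_contra hcon
          push_neg at hcon
          have := lb_ge a f hs _ hlt hcon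
          omega
        exact ih (start + 1) (by omega) (by omega)
      · rw [if_neg hc]
        have : lbN a f ≤ start := by
          by_contra hcon
          push_neg at hcon
          exact hc (lb_lt a f _ hlt hcon)
        omega
    · rw [if_neg hlt]
      have := lb_le a f
      omega

lemma coll_eq_aux (a : List Int) (f lim : Int) (pos : Bool) (hs : a.Pairwise (· ≤ ·)) :
    ∀ k idx, a.length - idx ≤ k → lbN a f ≤ idx →
      collA k a f lim pos idx =
        (if pos then (a.drop idx).take (lbN a lim - idx)
         else PySem.List.pyRange (idx : Int) (lbN a lim : Int) 1) := by
  intro k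
  induction k with
  | zero =>
    intro idx h1 h2
    have hge : lbN a lim ≤ idx := le_trans (lb_le a lim) (by omega)
    simp only [collA]
    simp [PySem.List.pyRange_one_eq_nil
      (show (lbN a lim : Int) ≤ (idx : Int) by exact_mod_cast hge),
      Nat.sub_eq_zero_of_le hge]
  | succ n ih =>
    intro idx h1 h2
    by_cases hlt : idx < a.length
    · simp only [collA]
      rw [if_pos hlt, PySem.List.pyGetD_natCast, List.getD_eq_getElem a 0 hlt]
      have hf : f ≤ a[idx] := lb_ge a f hs idx hlt h2
      by_cases hidx : idx < lbN a lim
      · have hlim : a[idx] < lim := lb_lt a lim idx hlt hidx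
        rw [if_pos ⟨hlim, hf⟩, ih (idx + 1) (by omega) (by omega)]
        have hdrop : a.drop idx = a[idx] :: a.drop (idx + 1) := List.drop_eq_getElem_cons hlt
        cases pos
        · simp only [Bool.false_eq_true, if_false]
          rw [show ((idx + 1 : Nat) : Int) = (idx : Int) + 1 by push_cast; ring,
            ← PySem.List.pyRange_one_cons
              (show (idx : Int) < (lbN a lim : Int) by exact_mod_cast hidx)]
        · simp only [if_true]
          rw [hdrop, show lbN a lim - idx = (lbN a lim - (idx + 1)) + 1 from by omega,
            List.take_succ_cons]
      · push_neg at hidx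
        have hlim : ¬ a[idx] < lim := not_lt.mpr (lb_ge a lim hs idx hlt hidx)
        rw [if_neg (fun hc => hlim hc.1)]
        simp [PySem.List.pyRange_one_eq_nil
          (show (lbN a lim : Int) ≤ (idx : Int) by exact_mod_cast hidx),
          Nat.sub_eq_zero_of_le hidx]
    · have hge : lbN a lim ≤ idx := le_trans (lb_le a lim) (by omega)
      simp only [collA]
      rw [if_neg hlt]
      simp [PySem.List.pyRange_one_eq_nil
        (show (lbN a lim : Int) ≤ (idx : Int) by exact_mod_cast hge),
        Nat.sub_eq_zero_of_le hge]

-- the value of one output row, expressed through lbN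
def rowL (a : List Int) (pos : Bool) (f m : Int) : List Int :=
  if pos then (a.drop (lbN a f)).take (lbN a (f + m) - lbN a f)
  else PySem.List.pyRange ((lbN a f : Nat) : Int) ((lbN a (f + m) : Nat) : Int) 1

lemma loop_eq (a : List Int) (pos : Bool) (hs : a.Pairwise (· ≤ ·)) :
    ∀ (pairs : List (Int × Int)) (start : Nat) (out : List (List Int)),
      List.IsChain (· ≤ ·) (pairs.map Prod.fst) →
      (∀ p ∈ pairs.head?, start ≤ lbN a p.1) →
      loopA a pos pairs start out = out ++ pairs.map (fun p => rowL a pos p.1 p.2) := by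
  intro pairs
  induction pairs with
  | nil => intro start out _ _; simp [loopA]
  | cons p rest ih =>
    obtain ⟨f, m⟩ := p
    intro start out hch hhd
    simp only [List.map_cons] at hch
    have hstart : start ≤ lbN a f := hhd (f, m) rfl
    have hadv : advA (a.length + 1) a f start = lbN a f :=
      adv_eq_aux a f hs (a.length + 1) start (by omega) hstart
    have hcoll : collA (a.length + 1) a f (f + m) pos (lbN a f) = rowL a pos f m := by
      rw [coll_eq_aux a f (f + m) pos hs (a.length + 1) (lbN a f) (by have := lb_le a f; omega) le_rfl]
      rfl
    have hch' : List.IsChain (· ≤ ·) (rest.map Prod.fst) := by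
      have ht := hch.tail
      simpa using ht
    show loopA a pos rest (advA (a.length + 1) a f start)
      (out ++ [collA (a.length + 1) a f (f + m) pos (advA (a.length + 1) a f start)]) = _
    rw [hadv, hcoll, ih (lbN a f) (out ++ [rowL a pos f m]) hch' ?_]
    · simp
    · intro q hq
      cases rest with
      | nil => simp at hq
      | cons r rs =>
        obtain rfl := (by simpa using hq : r = q)
        simp only [List.map_cons] at hch
        exact lb_mono a hs (List.rel_of_isChain_cons_cons hch)

lemma isSortedA_of_chain (l : List Int) (h : List.IsChain (· ≤ ·) l) : isSortedA l = true := by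
  unfold isSortedA
  rw [List.all_eq_true]
  intro b hb
  simp only [List.mem_map] at hb
  obtain ⟨ii, hii, rfl⟩ := hb
  rw [PySem.List.mem_pyRange_one] at hii
  have h1 : ii.toNat + 1 < l.length := by omega
  rw [show ii = ((ii.toNat : Nat) : Int) by omega, PySem.List.pyGetD_natCast,
    show ((ii.toNat : Nat) : Int) + 1 = ((ii.toNat + 1 : Nat) : Int) by push_cast; ring,
    PySem.List.pyGetD_natCast, List.getD_eq_getElem l 0 (by omega), List.getD_eq_getElem l 0 h1]
  simpa using List.isChain_iff_getElem.mp h ii.toNat h1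

lemma isSortedB_of_chain (l : List Int) (h : List.IsChain (· ≤ ·) l) : isSortedB l = true := by
  unfold isSortedB
  rw [PySem.List.slice_from_one]
  induction l with
  | nil => rfl
  | cons a t ih =>
    cases t with
    | nil => rfl
    | cons b t' =>
      rw [List.isChain_cons_cons] at h
      simp only [List.tail_cons, List.zip_cons_cons, List.all_cons, Bool.and_eq_true,
        decide_eq_true_eq]
      refine ⟨h.1, ?_⟩
      simpa using ih h.2

lemma zip_replicate_const (l : List Int) (c : Int) :
    l.zip (List.replicate l.length c) = l.map (fun f => (f, c)) := by
  induction l with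
  | nil => rfl
  | cons a t ih => simp [List.replicate_succ, ih]

-- ===== VERDICT (by name: the statement is the Claim_ definition above) =====
theorem pairSortedForwardReverse_spec : Claim_equal_pairSortedForwardReverse := by
  intro forwards reverses maxLength returnPos _hdom hpre
  obtain ⟨hf, hr⟩ := hpre
  have hrp : reverses.Pairwise (· ≤ ·) := List.isChain_iff_pairwise.mp hr
  unfold Spec_pairSortedForwardReverse pairSortedForwardReverse pairSortedForwardReverse_alt
  simp only [List.length_replicate, ne_eq, not_true_eq_false, if_false,
    isSortedA_of_chain _ hf, isSortedA_of_chain _ hr,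
    isSortedB_of_chain _ hf, isSortedB_of_chain _ hr,
    Bool.and_self, if_true, not_true_eq_false]
  rw [zip_replicate_const]
  rw [loop_eq reverses returnPos hrp (forwards.map (fun f => (f, maxLength.getD 30000))) 0 []
      (by
        have hmf : (forwards.map (fun f => (f, maxLength.getD 30000))).map Prod.fst = forwards := by
          simp [List.map_map, Function.comp_def]
        rw [hmf]; exact hf)
      (by intro p _; exact Nat.zero_le _)]
  simp only [List.nil_append, List.map_map]
  apply List.map_congr_left
  intro f _
  simp only [Function.comp]
  rw [bis_eq reverses f hrp, bis_eq reverses (f + maxLength.getD 30000) hrp]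
  cases returnPos
  · simp [rowL]
  · simp [rowL, PySem.List.slice_natCast]
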